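-- pv_equiv track=rewrite | github.com/Codeology/LessonPlans | Spring2017/Week1/leastTiles.py | leastTiles
-- ===== SOURCE A (Python) =====
-- def leastTiles(tiles):
--     col_count = 0
--     row_count = 0
--
--     # columns
--     for col_i in range(len(tiles[0])):
--         col_count += colCount(tiles, col_i) # defined below
--
--     # rows
--     for row in tiles:
--         row_count += rowCount(row) # defined below
--
--     if col_count == row_count:
--         return 0
--     elif col_count > row_count:
--         return 1
--     else:
--         return 2
--
-- def rowCount(arr):
--     if len(arr) > 0:
--         count = 0
--         prev = arr[0]
--         for i in range(1, len(arr)):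
--             curr = arr[i]
--             if curr == 0:
--                 continue
--             if curr == prev:
--                 count += 1
--                 prev = -1
--             else:
--                 prev = curr
--         return count
--     else:
--         return 0
--
-- def colCount(matrix, col_i):
--     if len(matrix) < 0:
--         return 0
--     if matrix[0]:
--         count = 0
--         prev = matrix[0][col_i]
--         for row_i in range(1, len(matrix)):
--             curr = matrix[row_i][col_i]
--             if curr == 0:
--                 continue
--             if curr == prev:
--                 count += 1
--                 prev = -1
--             else:
--                 prev = curr
--         return count
--     else:
--         return 0
-- ===== SOURCE B (Python) =====
-- def leastTiles(tiles):
--     # Single pass over the rows, keeping one running 'prev' per column,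
--     # instead of A's separate column-major passes.
--     first = tiles[0]
--     prev_col = list(first)
--     col_count = 0
--     row_count = scanCount(first)
--     for row in tiles[1:]:
--         row_count += scanCount(row)
--         new_prev = []
--         for p, curr in zip(prev_col, row):
--             if curr == 0:
--                 new_prev.append(p)
--             elif curr == p:
--                 col_count += 1
--                 new_prev.append(-1)
--             else:
--                 new_prev.append(curr)
--         prev_col = new_prev
--     if col_count == row_count:
--         return 0
--     if col_count > row_count:
--         return 1
--     return 2
--
-- def scanCount(arr):
--     count = 0
--     prev = None
--     for x in arr:
--         if prev is None:
--             prev = x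
--         elif x == 0:
--             continue
--         elif x == prev:
--             count += 1
--             prev = -1
--         else:
--             prev = x
--     return count
-- ===== Notes on version B (the rewrite author's own statement) =====
-- stated objective: alternative
-- what changed: Replaces A's column-major passes (one full scan of the matrix per column, plus a second loop over rows) by a single row-major traversal that keeps a per-column vector of running 'prev' states and accumulates the row counts in the same pass.
import Mathlib
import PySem

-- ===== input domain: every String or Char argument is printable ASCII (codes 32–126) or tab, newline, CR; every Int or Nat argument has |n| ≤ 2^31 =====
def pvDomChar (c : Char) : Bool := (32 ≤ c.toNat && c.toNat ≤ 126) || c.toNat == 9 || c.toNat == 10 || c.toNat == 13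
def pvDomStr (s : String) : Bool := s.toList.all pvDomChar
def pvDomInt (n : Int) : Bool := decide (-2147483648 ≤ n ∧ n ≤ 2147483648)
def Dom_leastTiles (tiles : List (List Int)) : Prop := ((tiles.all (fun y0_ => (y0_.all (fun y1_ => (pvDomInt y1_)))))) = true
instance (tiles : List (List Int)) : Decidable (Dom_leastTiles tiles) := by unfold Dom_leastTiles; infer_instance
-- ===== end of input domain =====

-- B fuses A's per-column passes into one row-major traversal with a per-column 'prev' vector (alternative decomposition, same cost).

-- ===== PORT A =====
-- rowCount: indexed scan from position 1, prev initialised to arr[0]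
def rowCount (arr : List Int) : Int :=
  if PySem.List.len arr > 0 then
    ((PySem.List.pyRange 1 (PySem.List.len arr) 1).foldl
      (fun (s : Int × Int) i =>
        let curr := PySem.List.pyGetD arr i 0
        if curr = 0 then s
        else if curr = s.2 then (s.1 + 1, -1)
        else (s.1, curr))
      (0, PySem.List.pyGetD arr 0 0)).1
  else 0

-- colCount: same scan down one column; matrix[0] raising on [] is outside Pre_ (default branch)
def colCount (matrix : List (List Int)) (col_i : Int) : Int :=
  if PySem.List.len matrix < 0 then 0
  else
    match PySem.List.pyGet? matrix 0 with
    | none => 0      -- IndexError in Python (matrix = []); excluded by Pre_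
    | some r0 =>
      if r0 ≠ [] then
        ((PySem.List.pyRange 1 (PySem.List.len matrix) 1).foldl
          (fun (s : Int × Int) row_i =>
            let curr := PySem.List.pyGetD (PySem.List.pyGetD matrix row_i []) col_i 0
            if curr = 0 then s
            else if curr = s.2 then (s.1 + 1, -1)
            else (s.1, curr))
          (0, PySem.List.pyGetD r0 col_i 0)).1
      else 0

def leastTiles (tiles : List (List Int)) : Int :=
  let first := PySem.List.pyGetD tiles 0 []   -- tiles[0]; IndexError on [] excluded by Pre_
  let col_count := (PySem.List.pyRange 0 (PySem.List.len first) 1).foldl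
      (fun (acc : Int) i => acc + colCount tiles i) 0
  let row_count := tiles.foldl (fun (acc : Int) row => acc + rowCount row) 0
  if col_count = row_count then 0
  else if col_count > row_count then 1
  else 2

-- ===== PORT B =====
-- scanCount: single fold over the list, prev : Option Int starts as None
def scanCount (arr : List Int) : Int :=
  (arr.foldl
    (fun (s : Int × Option Int) x =>
      match s.2 with
      | none => (s.1, some x)
      | some p =>
        if x = 0 then s
        else if x = p then (s.1 + 1, some (-1))
        else (s.1, some x))
    (0, none)).1

-- fused single pass: state = (col_count, row_count, prev_col); tiles[1:] is the tail
def leastTiles_alt (tiles : List (List Int)) : Int :=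
  match tiles with
  | [] => 0      -- tiles[0] raises IndexError in Python; excluded by Pre_
  | first :: rest =>
    let s := rest.foldl
      (fun (s : Int × Int × List Int) row =>
        let rc := s.2.1 + scanCount row
        let t := (s.2.2.zip row).foldl
          (fun (t : Int × List Int) pc =>
            if pc.2 = 0 then (t.1, t.2 ++ [pc.1])
            else if pc.2 = pc.1 then (t.1 + 1, t.2 ++ [-1])
            else (t.1, t.2 ++ [pc.2]))
          (s.1, ([] : List Int))
        (t.1, rc, t.2))
      (0, scanCount first, first)
    if s.1 = s.2.1 then 0
    else if s.1 > s.2.1 then 1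
    else 2

-- ===== PRECONDITION & SPEC =====
-- Pre_ excludes exactly the inputs where A raises IndexError: the empty grid, and grids
-- with a row shorter than the first row (colCount then indexes past that row's end).
def Pre_leastTiles (tiles : List (List Int)) : Prop :=
  tiles ≠ [] ∧ ∀ row ∈ tiles, (tiles.headD []).length ≤ row.length
instance (tiles : List (List Int)) : Decidable (Pre_leastTiles tiles) := by
  unfold Pre_leastTiles; infer_instance

def pvWitness_leastTiles : List (List Int) := [[1, 1, 2], [1, 0, 2], [2, 2, 2]]

def Spec_leastTiles (tiles : List (List Int)) (out : Int) : Prop := out = leastTiles_alt tiles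
instance (tiles : List (List Int)) (out : Int) : Decidable (Spec_leastTiles tiles out) := by
  unfold Spec_leastTiles; infer_instance

-- ===== CLAIM (what is proved, stated in full; the proofs are below) =====
def Claim_equal_leastTiles : Prop := ∀ (tiles : List (List Int)), Dom_leastTiles tiles → Pre_leastTiles tiles → Spec_leastTiles tiles (leastTiles tiles)

-- ===== LEMMAS AND PROOFS =====

-- the shared scalar scan step (curr against prev, counting matches)
def step1 (s : Int × Int) (x : Int) : Int × Int :=
  if x = 0 then s
  else if x = s.2 then (s.1 + 1, -1)
  else (s.1, x)

theorem step1_fst_snd (c p x : Int) :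
    step1 (c, p) x = (c + (step1 (0, p) x).1, (step1 (0, p) x).2) := by
  unfold step1
  split_ifs <;> simp

-- count part of a per-column scan is an additive shift of the count-from-0 scan
theorem step1_shift' (k : Nat) (rows : List (List Int)) (c p : Int) :
    rows.foldl (fun s r => step1 s (r.getD k 0)) (c, p)
      = (c + (rows.foldl (fun s r => step1 s (r.getD k 0)) (0, p)).1,
         (rows.foldl (fun s r => step1 s (r.getD k 0)) (0, p)).2) := by
  induction rows generalizing c p with
  | nil => simp
  | cons r rows ih =>
    rw [List.foldl_cons, List.foldl_cons]
    rcases hs : step1 (0, p) (r.getD k 0) with ⟨s1, q⟩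
    have h' : step1 (c, p) (r.getD k 0) = (c + s1, q) := by
      rw [step1_fst_snd c p, hs]
    rw [h', ih (c + s1) q, ih s1 q]
    simp [add_assoc]

-- B's scanCount with prev already set equals the scalar scan
theorem scan_some (xs : List Int) (c p : Int) :
    xs.foldl
      (fun (s : Int × Option Int) x =>
        match s.2 with
        | none => (s.1, some x)
        | some p =>
          if x = 0 then s
          else if x = p then (s.1 + 1, some (-1))
          else (s.1, some x))
      (c, some p)
    = ((xs.foldl step1 (c, p)).1, some (xs.foldl step1 (c, p)).2) := by
  induction xs generalizing c p with
  | nil => simp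
  | cons x xs ih =>
    by_cases h1 : x = 0
    · simp [List.foldl_cons, ih, step1, h1]
    · by_cases h2 : x = p
      · subst h2
        simp [List.foldl_cons, ih, step1, h1]
      · simp [List.foldl_cons, ih, step1, h1, h2]

-- A's rowCount = B's scanCount
theorem rowCount_eq_scanCount (arr : List Int) : rowCount arr = scanCount arr := by
  cases arr with
  | nil => simp [rowCount, scanCount, PySem.List.len]
  | cons x xs =>
    unfold rowCount scanCount
    rw [if_pos (by simp only [PySem.List.len_eq, List.length_cons]; omega)]
    have hfold := PySem.List.foldl_pyRange_pyGetD (x :: xs) (0 : Int) step1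
      ((0 : Int), PySem.List.pyGetD (x :: xs) 0 0) (a := 1) (by norm_num)
    simp only [step1] at hfold
    rw [hfold]
    simp only [Int.toNat_one, List.drop_one, List.tail_cons,
      PySem.List.pyGetD_zero_cons, List.foldl_cons]
    rw [scan_some]

-- the inner zip-fold of B: count increments sum up, prevs are rebuilt pointwise
theorem zipfold (z : List (Int × Int)) (c : Int) (acc : List Int) :
    z.foldl
      (fun (t : Int × List Int) pc =>
        if pc.2 = 0 then (t.1, t.2 ++ [pc.1])
        else if pc.2 = pc.1 then (t.1 + 1, t.2 ++ [-1])
        else (t.1, t.2 ++ [pc.2]))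
      (c, acc)
    = (c + (z.map (fun pc => (step1 (0, pc.1) pc.2).1)).sum,
       acc ++ z.map (fun pc => (step1 (0, pc.1) pc.2).2)) := by
  induction z generalizing c acc with
  | nil => simp
  | cons pc z ih =>
    obtain ⟨a, b⟩ := pc
    by_cases h1 : b = 0
    · simp [List.foldl_cons, ih, step1, h1, add_assoc]
    · by_cases h2 : b = a
      · subst h2
        simp [List.foldl_cons, ih, step1, h1, add_assoc]
      · simp [List.foldl_cons, ih, step1, h1, h2, add_assoc]

-- A's colCount (at a valid column index) = the scalar scan down that column
theorem colCount_eq (first : List Int) (rest : List (List Int)) (k : Nat)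
    (hk : k < first.length) (hr : ∀ row ∈ rest, first.length ≤ row.length) :
    colCount (first :: rest) (k : Int)
      = (rest.foldl (fun s row => step1 s (row.getD k 0)) (0, first.getD k 0)).1 := by
  unfold colCount
  rw [if_neg (by simp only [PySem.List.len_eq]; omega)]
  simp only [PySem.List.pyGet?_zero_cons]
  rw [if_pos (by intro h; subst h; simp at hk)]
  have hfold := PySem.List.foldl_pyRange_pyGetD (first :: rest) ([] : List Int)
    (fun (s : Int × Int) row => step1 s (PySem.List.pyGetD row (k : Int) 0))
    ((0 : Int), PySem.List.pyGetD first (k : Int) 0) (a := 1) (by norm_num)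
  simp only [step1] at hfold
  rw [hfold]
  simp only [Int.toNat_one, List.drop_one, List.tail_cons]
  have hget : ∀ row : List Int, PySem.List.pyGetD row (k : Int) 0 = row.getD k 0 := by
    intro row; simp
  simp only [hget, step1]

theorem map_getD_range (l : List Int) :
    (List.range l.length).map (fun k => l.getD k 0) = l := by
  apply List.ext_getElem (by simp)
  intro i h1 h2
  simp only [List.getElem_map, List.getElem_range]
  exact List.getD_eq_getElem l 0 h2

-- the fused fold of B, characterised: count = sum of per-column scalar scans,
-- row part accumulates scanCount, prevs = per-column scalar-scan states
theorem fused_fold (rest : List (List Int)) (prevs : List Int) (c rc : Int)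
    (h : ∀ row ∈ rest, prevs.length ≤ row.length) :
    rest.foldl
      (fun (s : Int × Int × List Int) row =>
        let rc := s.2.1 + scanCount row
        let t := (s.2.2.zip row).foldl
          (fun (t : Int × List Int) pc =>
            if pc.2 = 0 then (t.1, t.2 ++ [pc.1])
            else if pc.2 = pc.1 then (t.1 + 1, t.2 ++ [-1])
            else (t.1, t.2 ++ [pc.2]))
          (s.1, ([] : List Int))
        (t.1, rc, t.2))
      (c, rc, prevs)
    = (c + ((List.range prevs.length).map
             (fun k => (rest.foldl (fun s row => step1 s (row.getD k 0)) (0, prevs.getD k 0)).1)).sum,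
       rc + (rest.map scanCount).sum,
       (List.range prevs.length).map
         (fun k => (rest.foldl (fun s row => step1 s (row.getD k 0)) (0, prevs.getD k 0)).2)) := by
  induction rest generalizing prevs c rc with
  | nil =>
    simp only [List.foldl_nil, List.map_nil, List.sum_nil, add_zero]
    refine Prod.ext (by simp) (Prod.ext rfl ?_)
    exact (map_getD_range prevs).symm
  | cons row rest ih =>
    have hrow : prevs.length ≤ row.length := h row (by simp)
    have hz : ∀ k : Nat, k < prevs.length → k < (prevs.zip row).length := by
      intro k hk; rw [List.length_zip]; omega
    have hzk : ∀ (k : Nat), k < prevs.length →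
        (prevs.zip row).getD k (0, 0) = (prevs.getD k 0, row.getD k 0) := by
      intro k hk
      rw [List.getD_eq_getElem _ _ (hz k hk), List.getElem_zip,
          List.getD_eq_getElem _ _ hk,
          List.getD_eq_getElem _ _ (by omega : k < row.length)]
    have hlen' : ((prevs.zip row).map (fun pc => (step1 (0, pc.1) pc.2).2)).length
        = prevs.length := by
      rw [List.length_map, List.length_zip]; omega
    have hpk : ∀ (k : Nat), k < prevs.length →
        ((prevs.zip row).map (fun pc => (step1 (0, pc.1) pc.2).2)).getD k 0
          = (step1 (0, prevs.getD k 0) (row.getD k 0)).2 := by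
      intro k hk
      rw [List.getD_eq_getElem _ _ (by rw [hlen']; exact hk), List.getElem_map,
          ← List.getD_eq_getElem _ (0, 0) (hz k hk), hzk k hk]
    have hmapsum : (prevs.zip row).map (fun pc => (step1 (0, pc.1) pc.2).1)
        = (List.range prevs.length).map
            (fun k => (step1 (0, prevs.getD k 0) (row.getD k 0)).1) := by
      apply List.ext_getElem
      · rw [List.length_map, List.length_zip, List.length_map, List.length_range]; omega
      · intro i h1 h2
        have hi : i < prevs.length := by
          rw [List.length_map, List.length_zip] at h1; omega
        rw [List.getElem_map, List.getElem_map, List.getElem_range,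
            ← List.getD_eq_getElem _ (0, 0) (hz i hi), hzk i hi]
    have hfull : ∀ (k : Nat), k < prevs.length →
        List.foldl (fun s r => step1 s (r.getD k 0)) (0, prevs.getD k 0) (row :: rest)
          = ((step1 (0, prevs.getD k 0) (row.getD k 0)).1
              + (List.foldl (fun s r => step1 s (r.getD k 0))
                  (0, ((prevs.zip row).map (fun pc => (step1 (0, pc.1) pc.2).2)).getD k 0) rest).1,
             (List.foldl (fun s r => step1 s (r.getD k 0))
                  (0, ((prevs.zip row).map (fun pc => (step1 (0, pc.1) pc.2).2)).getD k 0) rest).2) := by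
      intro k hk
      rw [List.foldl_cons,
          show step1 (0, prevs.getD k 0) (row.getD k 0)
            = ((step1 (0, prevs.getD k 0) (row.getD k 0)).1,
               (step1 (0, prevs.getD k 0) (row.getD k 0)).2) from rfl,
          step1_shift' k rest, ← hpk k hk]
    rw [List.foldl_cons]
    have hstep : (let rc2 := ((c, rc, prevs) : Int × Int × List Int).2.1 + scanCount row
        let t := (((c, rc, prevs) : Int × Int × List Int).2.2.zip row).foldl
          (fun (t : Int × List Int) pc =>
            if pc.2 = 0 then (t.1, t.2 ++ [pc.1])
            else if pc.2 = pc.1 then (t.1 + 1, t.2 ++ [-1])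
            else (t.1, t.2 ++ [pc.2]))
          (((c, rc, prevs) : Int × Int × List Int).1, ([] : List Int))
        ((t.1, rc2, t.2) : Int × Int × List Int))
      = (c + ((prevs.zip row).map (fun pc => (step1 (0, pc.1) pc.2).1)).sum,
         rc + scanCount row,
         (prevs.zip row).map (fun pc => (step1 (0, pc.1) pc.2).2)) := by
      simp [zipfold]
    rw [hstep, ih ((prevs.zip row).map (fun pc => (step1 (0, pc.1) pc.2).2))
        (c + ((prevs.zip row).map (fun pc => (step1 (0, pc.1) pc.2).1)).sum)
        (rc + scanCount row)
        (by intro r hr; rw [hlen']; exact h r (List.mem_cons_of_mem _ hr))]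
    simp only [Prod.mk.injEq]
    refine ⟨?_, ?_, ?_⟩
    · rw [hlen']
      have h1 : (List.range prevs.length).map
            (fun k => (List.foldl (fun s r => step1 s (r.getD k 0)) (0, prevs.getD k 0) (row :: rest)).1)
          = (List.range prevs.length).map
            (fun k => (step1 (0, prevs.getD k 0) (row.getD k 0)).1
              + (List.foldl (fun s r => step1 s (r.getD k 0))
                  (0, ((prevs.zip row).map (fun pc => (step1 (0, pc.1) pc.2).2)).getD k 0) rest).1) := by
        apply List.map_congr_left
        intro k hk
        rw [hfull k (List.mem_range.mp hk)]
      rw [h1, PySem.List.sum_map_add_int, hmapsum]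
      ring
    · rw [List.map_cons, List.sum_cons, add_assoc]
    · rw [hlen']
      apply List.map_congr_left
      intro k hk
      rw [hfull k (List.mem_range.mp hk)]

-- A's column loop = sum over columns of the scalar scans
theorem colSum (first : List Int) (rest : List (List Int))
    (hr : ∀ row ∈ rest, first.length ≤ row.length) :
    (PySem.List.pyRange 0 (PySem.List.len first) 1).foldl
      (fun (acc : Int) i => acc + colCount (first :: rest) i) 0
    = ((List.range first.length).map
        (fun k => (rest.foldl (fun s row => step1 s (row.getD k 0)) (0, first.getD k 0)).1)).sum := by
  rw [show PySem.List.len first = ((first.length : Int)) by simp [PySem.List.len_eq],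
      PySem.List.pyRange_one]
  simp only [Int.sub_zero, Int.toNat_natCast, List.foldl_map]
  rw [PySem.List.foldl_add (g := fun k : Nat => colCount (first :: rest) ((0 : Int) + k))]
  simp only [zero_add]
  apply congrArg
  apply List.map_congr_left
  intro k hk
  simp only [List.mem_range] at hk
  rw [colCount_eq first rest k hk hr]

-- A's row loop = scanCount summed
theorem rowSum (tiles : List (List Int)) :
    tiles.foldl (fun (acc : Int) row => acc + rowCount row) 0 = (tiles.map scanCount).sum := by
  rw [PySem.List.foldl_add (g := rowCount)]
  simp only [zero_add]
  apply congrArg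
  exact List.map_congr_left (fun r _ => rowCount_eq_scanCount r)

-- ===== VERDICT (by name: the statement is the Claim_ definition above) =====
theorem leastTiles_spec : Claim_equal_leastTiles := by
  intro tiles _ hpre
  obtain ⟨hne, hlen⟩ := hpre
  unfold Spec_leastTiles
  cases tiles with
  | nil => exact absurd rfl hne
  | cons first rest =>
    have hr : ∀ row ∈ rest, first.length ≤ row.length := by
      intro row hrow
      simpa using hlen row (by simp [hrow])
    unfold leastTiles leastTiles_alt
    simp only [PySem.List.pyGetD_zero_cons]
    rw [colSum first rest hr, rowSum,
        fused_fold rest first 0 (scanCount first) hr]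
    simp
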